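-- pv_equiv track=rewrite | github.com/LChanger/stock_god | sentiment-analysis/Any.py | get_parser_dict
-- ===== SOURCE A (Python) =====
-- def get_parser_dict(words, tuples):
--     child_dict = dict()
--     tuplelist = tuples[1:]
--     for index, arc in enumerate(tuplelist):
--         if words[arc[1] - 1] in child_dict:
--             tuple = (arc[0], words[arc[-1] - 1])  # 第一个元素是关系，第二个元素是子节点词
--             child_dict[words[arc[1] - 1]].append(tuple)
--         else:
--             child_dict[words[arc[1] - 1]] = []
--             tuple = (arc[0], words[arc[-1] - 1])  # 第一个元素是关系，第二个元素是子节点词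
--             child_dict[words[arc[1] - 1]].append(tuple)
--     return child_dict
-- ===== SOURCE B (Python) =====
-- def get_parser_dict(words, tuples):
--     pairs = [(words[arc[1] - 1], (arc[0], words[arc[-1] - 1])) for arc in tuples[1:]]
--     keys = list(dict.fromkeys(k for k, _ in pairs))
--     return {k: [v for k2, v in pairs if k2 == k] for k in keys}
-- ===== Notes on version B (the rewrite author's own statement) =====
-- stated objective: alternative
-- what changed: Replaces A's single-pass hash grouping (dict with membership test and per-key append) by a three-stage pipeline: materialise all (parent, (relation, child)) pairs, dedup the parent keys in first-occurrence order, then build the dict by a per-key filter over the pair list.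
import Mathlib
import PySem

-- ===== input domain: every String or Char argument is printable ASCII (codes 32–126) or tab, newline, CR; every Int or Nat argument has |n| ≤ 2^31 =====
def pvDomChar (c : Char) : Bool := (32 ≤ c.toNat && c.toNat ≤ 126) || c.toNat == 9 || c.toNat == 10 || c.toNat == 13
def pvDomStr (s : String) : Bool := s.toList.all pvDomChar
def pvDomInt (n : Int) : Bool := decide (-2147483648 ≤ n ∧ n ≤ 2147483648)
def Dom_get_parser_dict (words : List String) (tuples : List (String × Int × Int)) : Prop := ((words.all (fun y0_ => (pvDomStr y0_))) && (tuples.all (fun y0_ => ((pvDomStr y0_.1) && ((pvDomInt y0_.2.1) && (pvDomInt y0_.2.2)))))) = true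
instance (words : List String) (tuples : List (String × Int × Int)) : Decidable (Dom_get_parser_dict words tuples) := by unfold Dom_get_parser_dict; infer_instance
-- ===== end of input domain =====

-- B replaces A's single-pass hash grouping by a pair-list + key-dedup + per-key filter pipeline (objective: alternative).

-- ===== PORT A =====
-- literal port of A: slice tuples[1:], then a dict-building loop; words[i] is pyGetD
-- (valid under Pre_, which demands every index in Python range).
def get_parser_dict (words : List String) (tuples : List (String × Int × Int)) : List (String × List (String × String)) :=
  let tuplelist := PySem.List.slice tuples (some 1) none
  (tuplelist.foldl (fun child_dict arc =>
      if child_dict.contains (PySem.List.pyGetD words (arc.2.1 - 1) "") then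
        child_dict.modify (PySem.List.pyGetD words (arc.2.1 - 1) "") []
          (fun l => l ++ [(arc.1, PySem.List.pyGetD words (arc.2.2 - 1) "")])
      else
        ((child_dict.insert (PySem.List.pyGetD words (arc.2.1 - 1) "") []).modify
          (PySem.List.pyGetD words (arc.2.1 - 1) "") []
          (fun l => l ++ [(arc.1, PySem.List.pyGetD words (arc.2.2 - 1) "")]))
    ) PySem.Dict.empty).items

-- ===== PORT B =====
def get_parser_dict_alt (words : List String) (tuples : List (String × Int × Int)) : List (String × List (String × String)) :=
  let pairs := (PySem.List.slice tuples (some 1) none).map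
    (fun arc => (PySem.List.pyGetD words (arc.2.1 - 1) "", (arc.1, PySem.List.pyGetD words (arc.2.2 - 1) "")))
  let keys := PySem.List.dedup (pairs.map Prod.fst)
  keys.map (fun k => (k, (pairs.filter (fun p => p.1 == k)).map Prod.snd))

-- ===== PRECONDITION & SPEC =====
-- Pre_ excludes exactly the inputs on which Python A raises IndexError: some arc in tuples[1:]
-- indexes words out of Python range at arc[1]-1 or arc[-1]-1.
def Pre_get_parser_dict (words : List String) (tuples : List (String × Int × Int)) : Prop :=
  ∀ arc ∈ tuples.drop 1, PySem.Raise.InRange words.length (arc.2.1 - 1) ∧ PySem.Raise.InRange words.length (arc.2.2 - 1)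
instance (words : List String) (tuples : List (String × Int × Int)) : Decidable (Pre_get_parser_dict words tuples) := by unfold Pre_get_parser_dict; infer_instance
def pvWitness_get_parser_dict : List String × (List (String × Int × Int)) :=
  (["I", "like", "cats"], [("ROOT", 0, 2), ("nsubj", 2, 1), ("dobj", 2, 3)])
def Spec_get_parser_dict (words : List String) (tuples : List (String × Int × Int)) (out : List (String × List (String × String))) : Prop := out = get_parser_dict_alt words tuples
instance (words : List String) (tuples : List (String × Int × Int)) (out : List (String × List (String × String))) : Decidable (Spec_get_parser_dict words tuples out) := by unfold Spec_get_parser_dict; infer_instance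

-- ===== CLAIM (what is proved, stated in full; the proofs are below) =====
def Claim_equal_get_parser_dict : Prop := ∀ (words : List String) (tuples : List (String × Int × Int)), Dom_get_parser_dict words tuples → Pre_get_parser_dict words tuples → Spec_get_parser_dict words tuples (get_parser_dict words tuples)

-- ===== LEMMAS AND PROOFS =====

-- inserting an absent key with [] and then modifying it is just the modify
lemma insert_nil_modify {κ ν : Type} [BEq κ] [LawfulBEq κ] (d : PySem.Dict κ (List ν)) (k : κ)
    (f : List ν → List ν) (h : d.contains k = false) :
    (d.insert k []).modify k [] f = d.modify k [] f := by
  simp [PySem.Dict.modify, PySem.Dict.getD_insert_self, PySem.Dict.insert_insert_self,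
    PySem.Dict.getD_of_not_contains d ([] : List ν) h]

-- A's loop body, pointwise, is a plain modify
lemma loop_body_eq (words : List String) (l : List (String × Int × Int))
    (d : PySem.Dict String (List (String × String))) :
    l.foldl (fun child_dict arc =>
      if child_dict.contains (PySem.List.pyGetD words (arc.2.1 - 1) "") then
        child_dict.modify (PySem.List.pyGetD words (arc.2.1 - 1) "") []
          (fun l => l ++ [(arc.1, PySem.List.pyGetD words (arc.2.2 - 1) "")])
      else
        ((child_dict.insert (PySem.List.pyGetD words (arc.2.1 - 1) "") []).modify
          (PySem.List.pyGetD words (arc.2.1 - 1) "") []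
          (fun l => l ++ [(arc.1, PySem.List.pyGetD words (arc.2.2 - 1) "")]))) d
    = l.foldl (fun child_dict arc =>
        child_dict.modify (PySem.List.pyGetD words (arc.2.1 - 1) "") []
          (fun l => l ++ [(arc.1, PySem.List.pyGetD words (arc.2.2 - 1) "")])) d := by
  refine PySem.List.foldl_congr_mem l _ _ d (fun acc arc _ => ?_)
  by_cases h : acc.contains (PySem.List.pyGetD words (arc.2.1 - 1) "") = true
  · simp [h]
  · simp only [Bool.not_eq_true] at h
    simp [h, insert_nil_modify _ _ _ h]

-- the grouping dict, as an items list: dedup'd keys, each with its filtered values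
lemma grouped_items (pairs : List (String × (String × String))) :
    (pairs.foldl (fun d p => d.modify p.1 [] (fun l => l ++ [p.2])) PySem.Dict.empty).items
    = (PySem.List.dedup (pairs.map Prod.fst)).map
        (fun k => (k, (pairs.filter (fun p => p.1 == k)).map Prod.snd)) := by
  have hnd : (pairs.foldl (fun d p => d.modify p.1 [] (fun l => l ++ [p.2])) PySem.Dict.empty).keys.Nodup :=
    PySem.Dict.nodup_keys_foldl_modify_key pairs Prod.fst [] (fun d x => fun l => l ++ [x.2]) PySem.Dict.empty (by simp)
  rw [PySem.Dict.items_eq_map_keys _ hnd []]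
  rw [PySem.Dict.keys_foldl_modify_key pairs Prod.fst [] (fun d x => fun l => l ++ [x.2]) PySem.Dict.empty]
  refine List.map_congr_left (fun k hk => ?_)
  rw [PySem.Dict.getD_foldl_modify_append]
  simp only [PySem.Dict.getD_empty, List.nil_append]

-- ===== VERDICT (by name: the statement is the Claim_ definition above) =====
theorem get_parser_dict_spec : Claim_equal_get_parser_dict := by
  intro words tuples _ _
  show get_parser_dict words tuples = get_parser_dict_alt words tuples
  simp only [get_parser_dict, get_parser_dict_alt]
  rw [loop_body_eq, ← grouped_items, List.foldl_map]
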